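-- pv_equiv track=rewrite | github.com/ITM-Kitware/align-app | align_app/utils/utils.py | _apply_acronym_replacements
-- ===== SOURCE A (Python) =====
-- ACRONYM_REPLACEMENTS = {"Icl": "ICL", "Kdma": "KDMA"}
--
-- def _apply_acronym_replacements(text: str, preserve_case: bool = False):
--     """
--     Apply acronym replacements to text.
--
--     Args:
--         text (str): The text to process.
--         preserve_case (bool): If True, match acronyms in lowercase for sentence case.
--
--     Returns:
--         str: Text with acronym replacements applied.
--     """
--     for old, new in ACRONYM_REPLACEMENTS.items():
--         if preserve_case:
--             # Handle both lowercase and capitalized forms for sentence case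
--             text = text.replace(old.lower(), new)
--             text = text.replace(old.capitalize(), new)
--         else:
--             text = text.replace(old, new)
--     return text
-- ===== SOURCE B (Python) =====
-- ACRONYM_REPLACEMENTS = {"Icl": "ICL", "Kdma": "KDMA"}
--
-- def _apply_acronym_replacements(text: str, preserve_case: bool = False):
--     """Single left-to-right table-driven scan instead of repeated whole-string replace passes."""
--     table = {}
--     for old, new in ACRONYM_REPLACEMENTS.items():
--         if preserve_case:
--             table[old.lower()] = new
--             table[old.capitalize()] = new
--         else:
--             table[old] = new
--     out = []
--     i = 0
--     n = len(text)
--     while i < n: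
--         for key, new in table.items():
--             if text.startswith(key, i):
--                 out.append(new)
--                 i += len(key)
--                 break
--         else:
--             out.append(text[i])
--             i += 1
--     return "".join(out)
-- ===== Notes on version B (the rewrite author's own statement) =====
-- stated objective: alternative
-- what changed: A makes one whole-string str.replace pass per acronym form (2 or 4 sequential passes); B builds a form->canonical table once and does a single left-to-right scan that tries the table keys at each position, copying or replacing-and-skipping.
import Mathlib
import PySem

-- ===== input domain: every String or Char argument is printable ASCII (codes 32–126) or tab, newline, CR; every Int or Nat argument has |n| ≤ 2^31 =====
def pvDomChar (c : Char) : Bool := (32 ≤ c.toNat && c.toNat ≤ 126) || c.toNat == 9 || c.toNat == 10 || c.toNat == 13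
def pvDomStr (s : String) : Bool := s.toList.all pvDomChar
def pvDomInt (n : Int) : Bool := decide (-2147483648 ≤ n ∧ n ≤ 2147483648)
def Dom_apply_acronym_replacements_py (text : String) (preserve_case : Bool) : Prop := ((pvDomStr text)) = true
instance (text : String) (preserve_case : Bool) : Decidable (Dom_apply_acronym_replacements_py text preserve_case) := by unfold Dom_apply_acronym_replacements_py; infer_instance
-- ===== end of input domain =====

-- B replaces A's repeated whole-string str.replace passes by ONE left-to-right table-driven scan (objective: alternative, same return value).

-- ===== PORT A =====
-- str.capitalize has no PySem primitive; this transcription (uppercase first char, lowercase the rest) is exact on the ASCII domain.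
def pvCapitalizeStr (s : String) : String :=
  match s.toList with
  | [] => ""
  | c :: t => String.ofList (PySem.Chars.upper [c] ++ PySem.Chars.lower t)

def apply_acronym_replacements_py (text : String) (preserve_case : Bool) : String :=
  [("Icl", "ICL"), ("Kdma", "KDMA")].foldl
    (fun t p =>
      if preserve_case then
        PySem.Str.replace (PySem.Str.replace t (PySem.Str.lower p.1) p.2) (pvCapitalizeStr p.1) p.2
      else
        PySem.Str.replace t p.1 p.2)
    text

-- ===== PORT B =====
-- single left-to-right pass: at each position the first table key that is a prefix is replaced and skipped, else the char is copied
def pvScan (table : List (List Char × List Char)) (cs : List Char) : List Char :=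
  match cs with
  | [] => []
  | c :: t =>
    match table.find? (fun p => p.1.isPrefixOf (c :: t)) with
    | some p => p.2 ++ pvScan table (t.drop (p.1.length - 1))
    | none => c :: pvScan table t
termination_by cs.length
decreasing_by
  all_goals (simp; try omega)

def apply_acronym_replacements_py_alt (text : String) (preserve_case : Bool) : String :=
  String.ofList (pvScan
    (if preserve_case then
      [(['i','c','l'], ['I','C','L']), (['I','c','l'], ['I','C','L']),
       (['k','d','m','a'], ['K','D','M','A']), (['K','d','m','a'], ['K','D','M','A'])]
     else
      [(['I','c','l'], ['I','C','L']), (['K','d','m','a'], ['K','D','M','A'])])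
    text.toList)

-- ===== PRECONDITION & SPEC =====
def Spec_apply_acronym_replacements_py (text : String) (preserve_case : Bool) (out : String) : Prop := out = apply_acronym_replacements_py_alt text preserve_case
instance (text : String) (preserve_case : Bool) (out : String) : Decidable (Spec_apply_acronym_replacements_py text preserve_case out) := by unfold Spec_apply_acronym_replacements_py; infer_instance

-- ===== CLAIM (what is proved, stated in full; the proofs are below) =====
def Claim_equal_apply_acronym_replacements_py : Prop := ∀ (text : String) (preserve_case : Bool), Dom_apply_acronym_replacements_py text preserve_case → Spec_apply_acronym_replacements_py text preserve_case (apply_acronym_replacements_py text preserve_case)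

-- ===== LEMMAS AND PROOFS =====

-- "no fit": pattern q mismatches somewhere inside a at every start position, regardless of what follows a
def pvNoFit (a q : List Char) : Prop :=
  ∀ i < a.length, ∃ j < q.length, i + j < a.length ∧ a[i+j]? ≠ q[j]?

lemma pv_go_acc (o n : List Char) (fuel : Nat) (l acc : List Char) :
    PySem.Chars.replace.go o n fuel l acc = acc.reverse ++ PySem.Chars.replace.go o n fuel l [] := by
  induction fuel generalizing l acc with
  | zero => simp [PySem.Chars.replace.go]
  | succ f ih =>
    cases l with
    | nil => simp [PySem.Chars.replace.go]
    | cons c t =>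
      by_cases h : o.isPrefixOf (c :: t) = true
      · simp only [PySem.Chars.replace.go, h, if_pos]
        rw [ih _ (n.reverse ++ acc), ih _ (n.reverse ++ [])]
        simp
      · simp only [PySem.Chars.replace.go, h, Bool.false_eq_true, if_neg, not_false_iff]
        rw [ih t (c :: acc), ih t [c]]
        simp

lemma pv_go_fuel (o n : List Char) (ho : o ≠ []) (f1 : Nat) : ∀ (f2 : Nat) (l acc : List Char),
    l.length ≤ f1 → l.length ≤ f2 →
    PySem.Chars.replace.go o n f1 l acc = PySem.Chars.replace.go o n f2 l acc := by
  have hop : 0 < o.length := List.length_pos_iff.mpr ho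
  induction f1 with
  | zero =>
    intro f2 l acc h1 _
    have : l = [] := List.eq_nil_of_length_eq_zero (Nat.le_zero.mp h1)
    subst this
    cases f2 <;> simp [PySem.Chars.replace.go]
  | succ f ih =>
    intro f2 l acc h1 h2
    cases l with
    | nil => cases f2 <;> simp [PySem.Chars.replace.go]
    | cons c t =>
      simp only [List.length_cons] at h1 h2
      cases f2 with
      | zero => omega
      | succ f2' =>
        by_cases h : o.isPrefixOf (c :: t) = true
        · simp only [PySem.Chars.replace.go, h, if_pos]
          apply ih <;> simp <;> omega
        · simp only [PySem.Chars.replace.go, h, Bool.false_eq_true, if_neg, not_false_iff]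
          apply ih <;> omega

lemma pv_rep_nil (o n : List Char) (ho : o ≠ []) : PySem.Chars.replace [] o n = [] := by
  simp [PySem.Chars.replace, List.isEmpty_iff, ho, PySem.Chars.replace.go]

lemma pv_rep_cons_nomatch (o n : List Char) (c : Char) (t : List Char) (h : ¬ o <+: (c :: t)) :
    PySem.Chars.replace (c :: t) o n = c :: PySem.Chars.replace t o n := by
  have ho : o ≠ [] := by rintro rfl; exact h (List.nil_prefix)
  have hb : ¬ o.isPrefixOf (c :: t) = true := by simpa [List.isPrefixOf_iff_prefix] using h
  simp only [PySem.Chars.replace, List.isEmpty_iff, ho, List.length_cons]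
  simp only [PySem.Chars.replace.go, hb, Bool.false_eq_true, if_neg, not_false_iff]
  rw [pv_go_acc]
  simp

lemma pv_rep_match (o n u : List Char) (ho : o ≠ []) :
    PySem.Chars.replace (o ++ u) o n = n ++ PySem.Chars.replace u o n := by
  cases o with
  | nil => exact absurd rfl ho
  | cons oc ot =>
    have hb : (oc :: ot).isPrefixOf ((oc :: ot) ++ u) = true := by
      rw [List.isPrefixOf_iff_prefix]; exact List.prefix_append _ _
    simp only [PySem.Chars.replace, List.isEmpty_iff, List.cons_ne_nil, if_neg, not_false_iff]
    rw [show ((oc :: ot) ++ u).length = (ot.length + u.length) + 1 by simp; try omega]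
    rw [show ((oc :: ot) ++ u) = oc :: (ot ++ u) from rfl]
    simp only [PySem.Chars.replace.go, show (oc :: ot).isPrefixOf (oc :: (ot ++ u)) = true from hb, if_pos]
    rw [show (oc :: (ot ++ u)).drop (oc :: ot).length = u by
      simpa using List.drop_left (oc :: ot) u]
    rw [pv_go_acc]
    rw [pv_go_fuel (oc :: ot) n (by simp) _ u.length u _ (by simp; try omega) (le_refl _)]
    simp

lemma pvScan_nil (T : List (List Char × List Char)) : pvScan T [] = [] := by rw [pvScan]

lemma pvScan_cons (T : List (List Char × List Char)) (c : Char) (t : List Char) :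
    pvScan T (c :: t) =
      match T.find? (fun p => p.1.isPrefixOf (c :: t)) with
      | some p => p.2 ++ pvScan T (t.drop (p.1.length - 1))
      | none => c :: pvScan T t := by
  rw [pvScan]

lemma pv_not_prefix_of_noFit (a q u : List Char) (h : pvNoFit a q) (ha : a ≠ []) :
    ¬ q <+: (a ++ u) := by
  intro hp
  obtain ⟨j, hj, hja, hne⟩ := h 0 (List.length_pos_iff.mpr ha)
  simp only [Nat.zero_add] at hja hne
  obtain ⟨r, hr⟩ := hp
  apply hne
  rw [show a[j]? = (a ++ u)[j]? from (List.getElem?_append_left hja).symm, ← hr,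
      List.getElem?_append_left hj]

lemma pv_replace_append (q n a u : List Char) (h : pvNoFit a q) :
    PySem.Chars.replace (a ++ u) q n = a ++ PySem.Chars.replace u q n := by
  induction a generalizing u with
  | nil => simp
  | cons x a' ih =>
    have hnp : ¬ q <+: (x :: (a' ++ u)) := by
      exact pv_not_prefix_of_noFit (x :: a') q u h (by simp)
    have hfit : pvNoFit a' q := by
      intro i hi
      obtain ⟨j, hj, hja, hne⟩ := h (i + 1) (by simp; omega)
      refine ⟨j, hj, by simp at hja ⊢; omega, ?_⟩
      have he : (x :: a')[(i+1)+j]? = a'[i+j]? := by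
        rw [show (i+1)+j = (i+j)+1 by omega, List.getElem?_cons_succ]
      rwa [he] at hne
    rw [List.cons_append, pv_rep_cons_nomatch _ _ _ _ hnp, ih u hfit, List.cons_append]

lemma pv_pref_through (q n : List Char) (nh : Char) (ho : q ≠ []) (hn : n.head? = some nh)
    (w : List Char) : nh ∉ w → ∀ t, w <+: PySem.Chars.replace t q n → w <+: t := by
  induction w with
  | nil => intro _ t _; exact List.nil_prefix
  | cons a w' ih =>
    intro hw t hp
    have ha : a ≠ nh := fun h => hw (by simp [h])
    cases t with
    | nil =>
      rw [pv_rep_nil _ _ ho] at hp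
      exact absurd hp (by simp)
    | cons c t' =>
      by_cases hq : q <+: (c :: t')
      · obtain ⟨u, hu⟩ := hq
        rw [← hu, pv_rep_match _ _ _ ho] at hp
        cases n with
        | nil => simp at hn
        | cons n0 ns =>
          have hn0 : n0 = nh := by simpa using hn
          rw [List.cons_append] at hp
          exact absurd ((List.cons_prefix_cons.mp hp).1.trans hn0) ha
      · rw [pv_rep_cons_nomatch _ _ _ _ hq] at hp
        obtain ⟨h1, h2⟩ := List.cons_prefix_cons.mp hp
        exact List.cons_prefix_cons.mpr ⟨h1, ih (fun hm => hw (by simp [hm])) t' h2⟩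

lemma pv_main_false : ∀ (N : Nat) (s : List Char), s.length ≤ N →
    PySem.Chars.replace (PySem.Chars.replace s ['I','c','l'] ['I','C','L']) ['K','d','m','a'] ['K','D','M','A'] =
    pvScan [(['I','c','l'], ['I','C','L']), (['K','d','m','a'], ['K','D','M','A'])] s := by
  intro N
  induction N with
  | zero =>
    intro s hs
    have hs0 : s = [] := List.eq_nil_of_length_eq_zero (Nat.le_zero.mp hs)
    subst hs0
    rw [pv_rep_nil _ _ (by simp), pv_rep_nil _ _ (by simp), pvScan_nil]
  | succ N ih =>
    intro s hs
    cases s with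
    | nil => rw [pv_rep_nil _ _ (by simp), pv_rep_nil _ _ (by simp), pvScan_nil]
    | cons c t =>
      simp only [List.length_cons] at hs
      by_cases hI : ['I','c','l'] <+: (c :: t)
      · obtain ⟨u, hu⟩ := hI
        have hu' : 'I' :: 'c' :: 'l' :: u = c :: t := hu
        obtain ⟨hc, ht⟩ : 'I' = c ∧ 'c' :: 'l' :: u = t := by
          injection hu' with h1 h2; exact ⟨h1, h2⟩
        subst hc; subst ht
        simp only [List.length_cons] at hs
        have hL : PySem.Chars.replace (PySem.Chars.replace ('I' :: 'c' :: 'l' :: u) ['I','c','l'] ['I','C','L']) ['K','d','m','a'] ['K','D','M','A'] =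
            ['I','C','L'] ++ PySem.Chars.replace (PySem.Chars.replace u ['I','c','l'] ['I','C','L']) ['K','d','m','a'] ['K','D','M','A'] := by
          rw [show ('I' :: 'c' :: 'l' :: u : List Char) = ['I','c','l'] ++ u from rfl]
          rw [pv_rep_match _ _ _ (by simp)]
          rw [pv_replace_append _ _ _ _ (by unfold pvNoFit; decide)]
        rw [hL, pvScan_cons]
        exact congrArg _ (ih u (by omega))
      · by_cases hK : ['K','d','m','a'] <+: (c :: t)
        · obtain ⟨u, hu⟩ := hK
          have hu' : 'K' :: 'd' :: 'm' :: 'a' :: u = c :: t := hu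
          obtain ⟨hc, ht⟩ : 'K' = c ∧ 'd' :: 'm' :: 'a' :: u = t := by
            injection hu' with h1 h2; exact ⟨h1, h2⟩
          subst hc; subst ht
          simp only [List.length_cons] at hs
          have hL : PySem.Chars.replace (PySem.Chars.replace ('K' :: 'd' :: 'm' :: 'a' :: u) ['I','c','l'] ['I','C','L']) ['K','d','m','a'] ['K','D','M','A'] =
              ['K','D','M','A'] ++ PySem.Chars.replace (PySem.Chars.replace u ['I','c','l'] ['I','C','L']) ['K','d','m','a'] ['K','D','M','A'] := by
            rw [show ('K' :: 'd' :: 'm' :: 'a' :: u : List Char) = ['K','d','m','a'] ++ u from rfl]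
            rw [pv_replace_append _ _ _ _ (by unfold pvNoFit; decide)]
            rw [pv_rep_match _ _ _ (by simp)]
          rw [hL, pvScan_cons]
          exact congrArg _ (ih u (by omega))
        · rw [pv_rep_cons_nomatch _ _ _ _ hI]
          have hKp : ¬ (['K','d','m','a'] : List Char) <+:
              (c :: PySem.Chars.replace t ['I','c','l'] ['I','C','L']) := by
            intro hp
            obtain ⟨h1, h2⟩ := List.cons_prefix_cons.mp hp
            have h3 := pv_pref_through ['I','c','l'] ['I','C','L'] 'I' (by simp) rfl
              ['d','m','a'] (by decide) t h2
            exact hK (by rw [← h1] at *; exact List.cons_prefix_cons.mpr ⟨rfl, h3⟩)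
          rw [pv_rep_cons_nomatch _ _ _ _ hKp]
          rw [pvScan_cons]
          have hfind : (List.find? (fun p => p.1.isPrefixOf (c :: t))
              [((['I','c','l'] : List Char), (['I','C','L'] : List Char)), (['K','d','m','a'], ['K','D','M','A'])]) = none := by
            rw [List.find?_eq_none]
            intro p hp
            simp only [List.mem_cons] at hp
            rcases hp with rfl | rfl | h
            · simpa [List.isPrefixOf_iff_prefix] using hI
            · simpa [List.isPrefixOf_iff_prefix] using hK
            · simp at h
          rw [hfind]
          exact congrArg _ (ih t (by omega))

lemma pv_main_true : ∀ (N : Nat) (s : List Char), s.length ≤ N →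
    PySem.Chars.replace (PySem.Chars.replace (PySem.Chars.replace (PySem.Chars.replace s
        ['i','c','l'] ['I','C','L']) ['I','c','l'] ['I','C','L'])
        ['k','d','m','a'] ['K','D','M','A']) ['K','d','m','a'] ['K','D','M','A'] =
    pvScan [(['i','c','l'], ['I','C','L']), (['I','c','l'], ['I','C','L']),
            (['k','d','m','a'], ['K','D','M','A']), (['K','d','m','a'], ['K','D','M','A'])] s := by
  intro N
  induction N with
  | zero =>
    intro s hs
    have hs0 : s = [] := List.eq_nil_of_length_eq_zero (Nat.le_zero.mp hs)
    subst hs0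
    rw [pv_rep_nil _ _ (by simp), pv_rep_nil _ _ (by simp), pv_rep_nil _ _ (by simp),
        pv_rep_nil _ _ (by simp), pvScan_nil]
  | succ N ih =>
    intro s hs
    cases s with
    | nil =>
      rw [pv_rep_nil _ _ (by simp), pv_rep_nil _ _ (by simp), pv_rep_nil _ _ (by simp),
          pv_rep_nil _ _ (by simp), pvScan_nil]
    | cons c t =>
      simp only [List.length_cons] at hs
      by_cases h1 : ['i','c','l'] <+: (c :: t)
      · obtain ⟨u, hu⟩ := h1
        obtain ⟨hc, ht⟩ : 'i' = c ∧ 'c' :: 'l' :: u = t := by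
          have hu' : 'i' :: 'c' :: 'l' :: u = c :: t := hu
          injection hu' with ha hb; exact ⟨ha, hb⟩
        subst hc; subst ht
        simp only [List.length_cons] at hs
        have hL : PySem.Chars.replace (PySem.Chars.replace (PySem.Chars.replace (PySem.Chars.replace ('i'::'c'::'l'::u)
            ['i','c','l'] ['I','C','L']) ['I','c','l'] ['I','C','L'])
            ['k','d','m','a'] ['K','D','M','A']) ['K','d','m','a'] ['K','D','M','A'] =
            ['I','C','L'] ++ PySem.Chars.replace (PySem.Chars.replace (PySem.Chars.replace (PySem.Chars.replace u
            ['i','c','l'] ['I','C','L']) ['I','c','l'] ['I','C','L'])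
            ['k','d','m','a'] ['K','D','M','A']) ['K','d','m','a'] ['K','D','M','A'] := by
          rw [show ('i' :: 'c' :: 'l' :: u : List Char) = ['i','c','l'] ++ u from rfl]
          rw [pv_rep_match _ _ _ (by simp)]
          rw [pv_replace_append _ _ _ _ (by unfold pvNoFit; decide)]
          rw [pv_replace_append _ _ _ _ (by unfold pvNoFit; decide)]
          rw [pv_replace_append _ _ _ _ (by unfold pvNoFit; decide)]
        rw [hL, pvScan_cons]
        exact congrArg _ (ih u (by omega))
      · by_cases h2 : ['I','c','l'] <+: (c :: t)
        · obtain ⟨u, hu⟩ := h2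
          obtain ⟨hc, ht⟩ : 'I' = c ∧ 'c' :: 'l' :: u = t := by
            have hu' : 'I' :: 'c' :: 'l' :: u = c :: t := hu
            injection hu' with ha hb; exact ⟨ha, hb⟩
          subst hc; subst ht
          simp only [List.length_cons] at hs
          have hL : PySem.Chars.replace (PySem.Chars.replace (PySem.Chars.replace (PySem.Chars.replace ('I'::'c'::'l'::u)
              ['i','c','l'] ['I','C','L']) ['I','c','l'] ['I','C','L'])
              ['k','d','m','a'] ['K','D','M','A']) ['K','d','m','a'] ['K','D','M','A'] =
              ['I','C','L'] ++ PySem.Chars.replace (PySem.Chars.replace (PySem.Chars.replace (PySem.Chars.replace u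
              ['i','c','l'] ['I','C','L']) ['I','c','l'] ['I','C','L'])
              ['k','d','m','a'] ['K','D','M','A']) ['K','d','m','a'] ['K','D','M','A'] := by
            rw [show ('I' :: 'c' :: 'l' :: u : List Char) = ['I','c','l'] ++ u from rfl]
            rw [pv_replace_append _ _ _ _ (by unfold pvNoFit; decide)]
            rw [pv_rep_match _ _ _ (by simp)]
            rw [pv_replace_append _ _ _ _ (by unfold pvNoFit; decide)]
            rw [pv_replace_append _ _ _ _ (by unfold pvNoFit; decide)]
          rw [hL, pvScan_cons]
          exact congrArg _ (ih u (by omega))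
        · by_cases h3 : ['k','d','m','a'] <+: (c :: t)
          · obtain ⟨u, hu⟩ := h3
            obtain ⟨hc, ht⟩ : 'k' = c ∧ 'd' :: 'm' :: 'a' :: u = t := by
              have hu' : 'k' :: 'd' :: 'm' :: 'a' :: u = c :: t := hu
              injection hu' with ha hb; exact ⟨ha, hb⟩
            subst hc; subst ht
            simp only [List.length_cons] at hs
            have hL : PySem.Chars.replace (PySem.Chars.replace (PySem.Chars.replace (PySem.Chars.replace ('k'::'d'::'m'::'a'::u)
                ['i','c','l'] ['I','C','L']) ['I','c','l'] ['I','C','L'])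
                ['k','d','m','a'] ['K','D','M','A']) ['K','d','m','a'] ['K','D','M','A'] =
                ['K','D','M','A'] ++ PySem.Chars.replace (PySem.Chars.replace (PySem.Chars.replace (PySem.Chars.replace u
                ['i','c','l'] ['I','C','L']) ['I','c','l'] ['I','C','L'])
                ['k','d','m','a'] ['K','D','M','A']) ['K','d','m','a'] ['K','D','M','A'] := by
              rw [show ('k' :: 'd' :: 'm' :: 'a' :: u : List Char) = ['k','d','m','a'] ++ u from rfl]
              rw [pv_replace_append _ _ _ _ (by unfold pvNoFit; decide)]
              rw [pv_replace_append _ _ _ _ (by unfold pvNoFit; decide)]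
              rw [pv_rep_match _ _ _ (by simp)]
              rw [pv_replace_append _ _ _ _ (by unfold pvNoFit; decide)]
            rw [hL, pvScan_cons]
            exact congrArg _ (ih u (by omega))
          · by_cases h4 : ['K','d','m','a'] <+: (c :: t)
            · obtain ⟨u, hu⟩ := h4
              obtain ⟨hc, ht⟩ : 'K' = c ∧ 'd' :: 'm' :: 'a' :: u = t := by
                have hu' : 'K' :: 'd' :: 'm' :: 'a' :: u = c :: t := hu
                injection hu' with ha hb; exact ⟨ha, hb⟩
              subst hc; subst ht
              simp only [List.length_cons] at hs
              have hL : PySem.Chars.replace (PySem.Chars.replace (PySem.Chars.replace (PySem.Chars.replace ('K'::'d'::'m'::'a'::u)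
                  ['i','c','l'] ['I','C','L']) ['I','c','l'] ['I','C','L'])
                  ['k','d','m','a'] ['K','D','M','A']) ['K','d','m','a'] ['K','D','M','A'] =
                  ['K','D','M','A'] ++ PySem.Chars.replace (PySem.Chars.replace (PySem.Chars.replace (PySem.Chars.replace u
                  ['i','c','l'] ['I','C','L']) ['I','c','l'] ['I','C','L'])
                  ['k','d','m','a'] ['K','D','M','A']) ['K','d','m','a'] ['K','D','M','A'] := by
                rw [show ('K' :: 'd' :: 'm' :: 'a' :: u : List Char) = ['K','d','m','a'] ++ u from rfl]
                rw [pv_replace_append _ _ _ _ (by unfold pvNoFit; decide)]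
                rw [pv_replace_append _ _ _ _ (by unfold pvNoFit; decide)]
                rw [pv_replace_append _ _ _ _ (by unfold pvNoFit; decide)]
                rw [pv_rep_match _ _ _ (by simp)]
              rw [hL, pvScan_cons]
              exact congrArg _ (ih u (by omega))
            · -- no pattern matches at the head
              rw [pv_rep_cons_nomatch _ _ _ _ h1]
              have hp2 : ¬ (['I','c','l'] : List Char) <+:
                  (c :: PySem.Chars.replace t ['i','c','l'] ['I','C','L']) := by
                intro hp
                obtain ⟨ha, hb⟩ := List.cons_prefix_cons.mp hp
                have h' := pv_pref_through ['i','c','l'] ['I','C','L'] 'I' (by simp) rfl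
                  ['c','l'] (by decide) t hb
                exact h2 (by rw [← ha] at *; exact List.cons_prefix_cons.mpr ⟨rfl, h'⟩)
              rw [pv_rep_cons_nomatch _ _ _ _ hp2]
              have hp3 : ¬ (['k','d','m','a'] : List Char) <+:
                  (c :: PySem.Chars.replace (PySem.Chars.replace t ['i','c','l'] ['I','C','L']) ['I','c','l'] ['I','C','L']) := by
                intro hp
                obtain ⟨ha, hb⟩ := List.cons_prefix_cons.mp hp
                have hb1 := pv_pref_through ['I','c','l'] ['I','C','L'] 'I' (by simp) rfl
                  ['d','m','a'] (by decide) _ hb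
                have hb2 := pv_pref_through ['i','c','l'] ['I','C','L'] 'I' (by simp) rfl
                  ['d','m','a'] (by decide) t hb1
                exact h3 (by rw [← ha] at *; exact List.cons_prefix_cons.mpr ⟨rfl, hb2⟩)
              rw [pv_rep_cons_nomatch _ _ _ _ hp3]
              have hp4 : ¬ (['K','d','m','a'] : List Char) <+:
                  (c :: PySem.Chars.replace (PySem.Chars.replace (PySem.Chars.replace t ['i','c','l'] ['I','C','L']) ['I','c','l'] ['I','C','L']) ['k','d','m','a'] ['K','D','M','A']) := by
                intro hp
                obtain ⟨ha, hb⟩ := List.cons_prefix_cons.mp hp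
                have hb1 := pv_pref_through ['k','d','m','a'] ['K','D','M','A'] 'K' (by simp) rfl
                  ['d','m','a'] (by decide) _ hb
                have hb2 := pv_pref_through ['I','c','l'] ['I','C','L'] 'I' (by simp) rfl
                  ['d','m','a'] (by decide) _ hb1
                have hb3 := pv_pref_through ['i','c','l'] ['I','C','L'] 'I' (by simp) rfl
                  ['d','m','a'] (by decide) t hb2
                exact h4 (by rw [← ha] at *; exact List.cons_prefix_cons.mpr ⟨rfl, hb3⟩)
              rw [pv_rep_cons_nomatch _ _ _ _ hp4]
              rw [pvScan_cons]
              have hfind : (List.find? (fun p => p.1.isPrefixOf (c :: t))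
                  [((['i','c','l'] : List Char), (['I','C','L'] : List Char)), (['I','c','l'], ['I','C','L']),
                   (['k','d','m','a'], ['K','D','M','A']), (['K','d','m','a'], ['K','D','M','A'])]) = none := by
                rw [List.find?_eq_none]
                intro p hp
                simp only [List.mem_cons] at hp
                rcases hp with rfl | rfl | rfl | rfl | h
                · simpa [List.isPrefixOf_iff_prefix] using h1
                · simpa [List.isPrefixOf_iff_prefix] using h2
                · simpa [List.isPrefixOf_iff_prefix] using h3
                · simpa [List.isPrefixOf_iff_prefix] using h4
                · simp at h
              rw [hfind]
              exact congrArg _ (ih t (by omega))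

-- ===== VERDICT (by name: the statement is the Claim_ definition above) =====
theorem apply_acronym_replacements_py_spec : Claim_equal_apply_acronym_replacements_py := by
  intro text pc _
  unfold Spec_apply_acronym_replacements_py apply_acronym_replacements_py apply_acronym_replacements_py_alt
  have hrep : ∀ (s o n : String), PySem.Str.replace s o n = String.ofList (PySem.Chars.replace s.toList o.toList n.toList) := fun _ _ _ => rfl
  cases pc with
  | false =>
    simp only [List.foldl, Bool.false_eq_true, if_false]
    rw [hrep, hrep, String.toList_ofList]
    exact congrArg String.ofList (pv_main_false text.toList.length text.toList le_rfl)
  | true =>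
    simp only [List.foldl, if_true]
    rw [show PySem.Str.lower "Icl" = "icl" from by decide,
        show pvCapitalizeStr "Icl" = "Icl" from by decide,
        show PySem.Str.lower "Kdma" = "kdma" from by decide,
        show pvCapitalizeStr "Kdma" = "Kdma" from by decide]
    rw [hrep, hrep, hrep, hrep, String.toList_ofList, String.toList_ofList, String.toList_ofList]
    exact congrArg String.ofList (pv_main_true text.toList.length text.toList le_rfl)
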